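-- pv_equiv track=rewrite | github.com/ryanfriberg/anki_tools | legacy/meaning.py | get_duplicates
-- ===== SOURCE A (Python) =====
-- from collections import defaultdict
-- from typing import List, Set, Tuple
--
-- def get_duplicates(contexts: List, infos: List, tags: List) -> List[int]:
--     '''
--     Determines where duplicate card fronts are (to either be tagged or updated)
--     '''
--
--     tuple_indices = defaultdict(list)
--     for i in range(len(contexts)):
--         key = (contexts[i], infos[i], tuple(tags[i]))
--         tuple_indices[key].append(i)
--
--     matching_indices = [indices for indices in tuple_indices.values() if len(indices) > 1]
--     matching_indices = [tuple(sorted(ind)) for ind in matching_indices]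
--
--     return matching_indices
-- ===== SOURCE B (Python) =====
-- def get_duplicates(contexts, infos, tags):
--     '''
--     Determines where duplicate card fronts are (to either be tagged or updated)
--     '''
--     n = len(contexts)
--     keys = [(contexts[i], infos[i], tuple(tags[i])) for i in range(n)]
--     out = []
--     for i in range(n):
--         if keys.index(keys[i]) == i:  # first occurrence of this key
--             group = [j for j in range(n) if keys[j] == keys[i]]
--             if len(group) > 1:
--                 out.append(tuple(group))
--     return out
-- ===== Notes on version B (the rewrite author's own statement) =====
-- stated objective: alternative
-- what changed: Replaces the defaultdict grouping pass by a dict-free nested index scan: precompute the key list, emit for each first-occurrence index the list of all indices sharing its key, keeping groups of size > 1.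
import Mathlib
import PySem

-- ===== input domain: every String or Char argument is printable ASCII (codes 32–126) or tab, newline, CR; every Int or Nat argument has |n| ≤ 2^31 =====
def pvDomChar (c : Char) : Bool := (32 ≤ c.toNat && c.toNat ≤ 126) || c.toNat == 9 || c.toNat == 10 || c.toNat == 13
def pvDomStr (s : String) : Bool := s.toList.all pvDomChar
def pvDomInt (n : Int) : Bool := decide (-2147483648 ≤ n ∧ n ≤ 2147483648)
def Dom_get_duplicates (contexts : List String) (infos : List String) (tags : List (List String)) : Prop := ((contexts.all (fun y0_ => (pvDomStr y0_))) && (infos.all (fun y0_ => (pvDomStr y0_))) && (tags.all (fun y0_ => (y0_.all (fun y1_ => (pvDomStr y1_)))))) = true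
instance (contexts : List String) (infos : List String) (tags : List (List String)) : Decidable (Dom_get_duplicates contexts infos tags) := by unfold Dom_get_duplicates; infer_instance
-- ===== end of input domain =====

-- B replaces A's defaultdict grouping by a dict-free nested index scan over a precomputed key list
-- (objective: alternative decomposition, not faster). Return-value equivalence only; neither version mutates its arguments.

-- key = (contexts[i], infos[i], tuple(tags[i])) — shared by both ports (Pre_ keeps the indices in range)
def pvKey (contexts : List String) (infos : List String) (tags : List (List String)) (j : Int) :
    String × String × List String :=
  (PySem.List.pyGetD contexts j "", PySem.List.pyGetD infos j "", PySem.List.pyGetD tags j [])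

-- ===== PORT A =====
def get_duplicates (contexts : List String) (infos : List String) (tags : List (List String)) : List (List Int) :=
  -- tuple_indices = defaultdict(list); for i in range(len(contexts)): tuple_indices[key].append(i)
  let tuple_indices :=
    (PySem.List.pyRange 0 (PySem.List.len contexts) 1).foldl
      (fun d j => d.modify (pvKey contexts infos tags j) [] (fun l => l ++ [j]))
      PySem.Dict.empty
  let matching_indices :=
    tuple_indices.values.filter (fun indices => decide (1 < PySem.List.len indices))
  matching_indices.map (fun ind => PySem.List.sorted ind (fun x => x))

-- ===== PORT B =====
def get_duplicates_alt (contexts : List String) (infos : List String) (tags : List (List String)) : List (List Int) :=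
  let n := PySem.List.len contexts
  let keys := (PySem.List.pyRange 0 n 1).map (fun i => pvKey contexts infos tags i)
  (PySem.List.pyRange 0 n 1).foldl
    (fun out i =>
      let ki := PySem.List.pyGetD keys i ("", "", [])
      -- keys.index(keys[i]) == i  (keys[i] is always present, so .index cannot raise; getD 0 is exact)
      if ((PySem.List.index? keys ki).getD 0 : Int) = i then
        let group := (PySem.List.pyRange 0 n 1).filter
          (fun j => PySem.List.pyGetD keys j ("", "", []) == ki)
        if 1 < PySem.List.len group then out ++ [group] else out
      else out)
    []

-- ===== PRECONDITION & SPEC =====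
-- A raises IndexError when contexts is longer than infos or tags (the loop indexes infos[i], tags[i]); B raises there too.
def Pre_get_duplicates (contexts : List String) (infos : List String) (tags : List (List String)) : Prop :=
  contexts.length ≤ infos.length ∧ contexts.length ≤ tags.length
instance (contexts : List String) (infos : List String) (tags : List (List String)) : Decidable (Pre_get_duplicates contexts infos tags) := by unfold Pre_get_duplicates; infer_instance

def pvWitness_get_duplicates : List String × List String × List (List String) :=
  (["a", "b", "a"], ["x", "y", "x"], [["t"], [], ["t"]])

def Spec_get_duplicates (contexts : List String) (infos : List String) (tags : List (List String)) (out : List (List Int)) : Prop := out = get_duplicates_alt contexts infos tags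
instance (contexts : List String) (infos : List String) (tags : List (List String)) (out : List (List Int)) : Decidable (Spec_get_duplicates contexts infos tags out) := by unfold Spec_get_duplicates; infer_instance

-- ===== CLAIM (what is proved, stated in full; the proofs are below) =====
def Claim_equal_get_duplicates : Prop := ∀ (contexts : List String) (infos : List String) (tags : List (List String)), Dom_get_duplicates contexts infos tags → Pre_get_duplicates contexts infos tags → Spec_get_duplicates contexts infos tags (get_duplicates contexts infos tags)

-- ===== LEMMAS AND PROOFS =====

-- common normal form both ports are reduced to: for each first-occurrence index m (in order),
-- the ascending list of indices sharing its key, kept when it has more than one element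
def pvCanon (contexts : List String) (infos : List String) (tags : List (List String)) : List (List Int) :=
  let K : Nat → String × String × List String := fun m => pvKey contexts infos tags (m : Int)
  let n := contexts.length
  let occ : (String × String × List String) → List Int :=
    fun k => ((List.range n).filter (fun j => K j == k)).map (fun j => ((j : Nat) : Int))
  ((((List.range n).filter (fun m => decide (∀ j < m, K j ≠ K m))).map (fun m => occ (K m))).filter
    (fun g => decide (1 < (g.length : Int))))

-- set(map K (range n)) enumerates K at the first-occurrence indices, in order
lemma pv_ofList_map_range {α : Type} [DecidableEq α] [BEq α] [LawfulBEq α] (K : Nat → α) (n : Nat) :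
    PySem.Set.ofList ((List.range n).map K)
      = ((List.range n).filter (fun m => decide (∀ j < m, K j ≠ K m))).map K := by
  induction n with
  | zero => simp [PySem.Set.ofList_nil]
  | succ n ih =>
    rw [List.range_succ, List.map_append, show List.map K [n] = [K n] from rfl,
        PySem.Set.ofList_append_singleton, ih, List.filter_append, List.map_append]
    by_cases h : ∀ j < n, K j ≠ K n
    · have hnotmem : K n ∉ ((List.range n).filter (fun m => decide (∀ j < m, K j ≠ K m))).map K := by
        rw [← ih]
        simp only [PySem.Set.mem_ofList, List.mem_map, List.mem_range]
        rintro ⟨j, hj, hje⟩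
        exact h j hj hje
      rw [PySem.Set.add_of_not_mem hnotmem]
      congr 1
      simp only [List.filter_cons, List.filter_nil]
      rw [if_pos (by simpa using h)]
      rfl
    · have hmem : K n ∈ ((List.range n).filter (fun m => decide (∀ j < m, K j ≠ K m))).map K := by
        rw [← ih]
        push Not at h
        obtain ⟨j, hj, hje⟩ := h
        simp only [PySem.Set.mem_ofList, List.mem_map, List.mem_range]
        exact ⟨j, hj, hje⟩
      rw [PySem.Set.add_of_mem hmem]
      simp only [List.filter_cons, List.filter_nil]
      rw [if_neg (by simpa using h)]
      simp


-- keys.index(keys[m]) == m  iff  m is the first occurrence of its key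
lemma pv_index_first {α : Type} [BEq α] [LawfulBEq α] (K : Nat → α) (n m : Nat) (hm : m < n) :
    ((PySem.List.index? ((List.range n).map K) (K m)).getD 0 = m) ↔ (∀ j < m, K j ≠ K m) := by
  have hmem : K m ∈ (List.range n).map K := List.mem_map_of_mem (by simpa using hm)
  obtain ⟨k, hk⟩ := Option.isSome_iff_exists.mp ((PySem.List.index?_isSome_iff _ _).mpr hmem)
  obtain ⟨hklen, hkv, hkmin⟩ := PySem.List.getElem_of_index?_eq_some hk
  have hlen : ((List.range n).map K).length = n := by simp
  have helem : ∀ (j : Nat) (hj : j < n), ((List.range n).map K)[j]'(by simpa using hj) = K j := by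
    intro j hj; simp
  rw [hk]; simp only [Option.getD_some]
  constructor
  · rintro rfl
    intro j hj heq
    exact hkmin j hj (by rw [helem j (lt_trans hj (by simpa using hklen))]; exact heq)
  · intro hfirst
    have hkn : k < n := by simpa using hklen
    have hKk : K k = K m := by rw [← helem k hkn]; exact hkv
    rcases lt_trichotomy k m with h | h | h
    · exact absurd hKk (hfirst k h)
    · exact h
    · exact absurd (helem m hm) (hkmin m h)

lemma pv_occ_pairwise (K : Nat → String × String × List String) (n : Nat) (k : String × String × List String) :
    (((List.range n).filter (fun j => K j == k)).map (fun j => ((j : Nat) : Int))).Pairwise (· < ·) := by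
  refine List.Pairwise.map _ (fun a b h => by exact_mod_cast h) ?_
  exact List.Pairwise.sublist (List.filter_sublist) (List.pairwise_lt_range)


lemma pv_a_eq_canon (contexts : List String) (infos : List String) (tags : List (List String)) :
    get_duplicates contexts infos tags = pvCanon contexts infos tags := by
  simp only [get_duplicates]
  set K : Nat → String × String × List String := fun m => pvKey contexts infos tags (m : Int) with hK
  set n := contexts.length with hn
  set occ : (String × String × List String) → List Int :=
    fun k => ((List.range n).filter (fun j => K j == k)).map (fun j => ((j : Nat) : Int)) with hocc
  set L : List ((String × String × List String) × Int) :=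
    (List.range n).map (fun m => (K m, (m : Int))) with hL
  have hd : (PySem.List.pyRange 0 (PySem.List.len contexts) 1).foldl
      (fun d j => d.modify (pvKey contexts infos tags j) [] (fun l => l ++ [j]))
      PySem.Dict.empty
      = L.foldl (fun d p => d.modify p.1 [] (fun l => l ++ [p.2])) PySem.Dict.empty := by
    rw [PySem.List.len_eq, PySem.List.pyRange_zero_nat, List.foldl_map, hL, List.foldl_map]
  rw [hd]
  set d := L.foldl (fun d p => d.modify p.1 [] (fun l => l ++ [p.2])) PySem.Dict.empty with hdd
  have hkeys : d.keys = ((List.range n).filter (fun m => decide (∀ j < m, K j ≠ K m))).map K := by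
    rw [hdd, PySem.Dict.keys_foldl_modify_key L Prod.fst [] (fun _ p => (fun l => l ++ [p.2]))]
    rw [show (PySem.Dict.empty : PySem.Dict (String × String × List String) (List Int)).keys = [] from rfl]
    rw [PySem.Set.update_nil_left, hL, List.map_map]
    exact pv_ofList_map_range K n
  have hnd : d.keys.Nodup := by
    rw [hdd]
    exact PySem.Dict.nodup_keys_foldl_modify_key L Prod.fst [] (fun _ p => (fun l => l ++ [p.2]))
      PySem.Dict.empty (by simp [PySem.Dict.keys_empty])
  have hgetD : ∀ k, d.getD k [] = occ k := by
    intro k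
    rw [hdd, PySem.Dict.getD_foldl_modify_append L PySem.Dict.empty k, PySem.Dict.getD_empty,
        List.nil_append, hL, List.filter_map, List.map_map]
    rfl
  have hvalues : d.values = ((List.range n).filter (fun m => decide (∀ j < m, K j ≠ K m))).map
      (fun m => occ (K m)) := by
    have : d.values = d.items.map Prod.snd := rfl
    rw [this, PySem.Dict.items_eq_map_keys d hnd [], List.map_map, hkeys, List.map_map]
    exact List.map_congr_left (fun m _ => hgetD (K m))
  rw [hvalues]
  -- now reduce the outer filter+map to pvCanon
  simp only [PySem.List.len_eq]
  rw [show pvCanon contexts infos tags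
      = (((List.range n).filter (fun m => decide (∀ j < m, K j ≠ K m))).map (fun m => occ (K m))).filter
          (fun g => decide (1 < (g.length : Int))) from rfl]
  -- map sorted over the filtered list is the identity
  conv_rhs => rw [← List.map_id ((((List.range n).filter (fun m => decide (∀ j < m, K j ≠ K m))).map
      (fun m => occ (K m))).filter (fun g => decide (1 < (g.length : Int))))]
  apply List.map_congr_left
  intro g hg
  obtain ⟨m, _, hm⟩ := List.mem_map.mp (List.mem_of_mem_filter hg)
  subst hm
  exact PySem.List.sorted_eq_of_perm_of_pairwise_lt _ _ _ (List.Perm.refl _) (pv_occ_pairwise K n _)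

lemma pv_b_eq_canon (contexts : List String) (infos : List String) (tags : List (List String)) :
    get_duplicates_alt contexts infos tags = pvCanon contexts infos tags := by
  simp only [get_duplicates_alt, PySem.List.len_eq, PySem.List.pyRange_zero_nat]
  set N := contexts.length with hN
  set K : Nat → String × String × List String := fun m => pvKey contexts infos tags (m : Int) with hK
  set occ : (String × String × List String) → List Int :=
    fun k => ((List.range N).filter (fun j => K j == k)).map (fun j => ((j : Nat) : Int)) with hocc
  have hkeys : ((List.range N).map (fun k : Nat => (k : Int))).map (fun i => pvKey contexts infos tags i)
      = (List.range N).map K := by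
    rw [List.map_map]; rfl
  rw [hkeys, List.foldl_map]
  have hget : ∀ m, m < N → PySem.List.pyGetD ((List.range N).map K) ((m : Nat) : Int) ("", "", ([] : List String)) = K m := by
    intro m hm
    rw [PySem.List.pyGetD_natCast, List.getD_eq_getElem _ _ (by simpa using hm)]
    simp
  rw [PySem.List.foldl_congr_mem (List.range N) _
    (fun out m => if (∀ j < m, K j ≠ K m) ∧ 1 < ((occ (K m)).length : Int) then out ++ [occ (K m)] else out)
    [] ?hcong]
  case hcong =>
    intro out m hm
    rw [List.mem_range] at hm
    simp only
    rw [hget m hm]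
    have hgrp : ((List.range N).map (fun k : Nat => (k : Int))).filter
        (fun j => PySem.List.pyGetD ((List.range N).map K) j ("", "", []) == K m) = occ (K m) := by
      rw [List.filter_map, hocc]
      congr 1
      apply List.filter_congr
      intro j hj
      rw [List.mem_range] at hj
      simp only [Function.comp_apply]
      rw [hget j hj]
    by_cases hfirst : (∀ j < m, K j ≠ K m)
    · rw [if_pos (by exact_mod_cast (pv_index_first K N m hm).mpr hfirst), hgrp]
      by_cases hlen : 1 < ((occ (K m)).length : Int)
      · rw [if_pos hlen, if_pos ⟨hfirst, hlen⟩]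
      · rw [if_neg hlen, if_neg (by tauto)]
    · rw [if_neg ?_, if_neg (by tauto)]
      intro hidx
      exact hfirst ((pv_index_first K N m hm).mp (by exact_mod_cast hidx))
  rw [PySem.List.foldl_append_ite
    (fun m => (∀ j < m, K j ≠ K m) ∧ 1 < ((occ (K m)).length : Int))
    (fun m => occ (K m)) (List.range N) [], List.nil_append]
  have hsplit : (List.range N).filter
        (fun m => decide ((∀ j < m, K j ≠ K m) ∧ 1 < ((occ (K m)).length : Int)))
      = ((List.range N).filter (fun m => decide (∀ j < m, K j ≠ K m))).filter
          (fun m => decide (1 < ((occ (K m)).length : Int))) := by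
    rw [List.filter_filter]
    apply List.filter_congr
    intro m _
    simp [Bool.and_comm]
  rw [hsplit]
  have hfm := (List.filter_map
    (f := fun m => occ (K m)) (p := fun g => decide (1 < (g.length : Int)))
    (l := (List.range N).filter (fun m => decide (∀ j < m, K j ≠ K m)))).symm
  simp only [Function.comp_def] at hfm
  rw [hfm]
  simp only [pvCanon]
  rw [hocc, hK]

-- ===== VERDICT (by name: the statement is the Claim_ definition above) =====
theorem get_duplicates_spec : Claim_equal_get_duplicates := by
  intro contexts infos tags _ _
  unfold Spec_get_duplicates
  rw [pv_a_eq_canon, pv_b_eq_canon]
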